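-- pv_equiv track=rewrite | github.com/chrislucas/code-wars-python | math/Polynomial2Coefficient/solution/Coefficient.py | calc_poly
-- ===== SOURCE A (Python) =====
-- def calc_poly(pol_list, x):
--     cpol = []
--     q = len(pol_list)-1
--     #your code here
--     acc, idx2 = 0, q
--     for idx in range(q, -1, -1):
--         coef = pol_list[q-idx]
--         if coef is not 0:
--             acc += coef * (x ** idx)
--             copy_coef = coef if coef > 0 else -coef
--             if idx > 1:
--                 pol = "{0}*x^{1}".format(copy_coef, idx) if copy_coef > 1 or copy_coef < 0 else "x^{0}".format(idx)
--             elif idx == 1: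
--                 pol = "{0}*x".format(copy_coef) if copy_coef > 1 or copy_coef < 0 else "x"
--             else:
--                 pol = "{0}".format(copy_coef)
--
--             # adicionar sinal positivo a esquerda
--             if idx2 < q:
--                 if coef > 0:
--                     pol = " + {0}".format(pol)
--                 else:
--                     pol = " - {0}".format(pol)
--             # a nao ser que o primeiro coeficiente valido for negativo
--             elif coef < 0:
--                 pol = "-{0}".format(pol)
--             cpol.append(pol)
--             idx2 -= 1
--
--     return "For {0} with x = {1} the value is {2}".format(''.join(cpol), x, acc)
-- ===== SOURCE B (Python) =====
-- def calc_poly(pol_list, x):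
--     # Horner evaluation: one multiply-add per coefficient
--     value = 0
--     for c in pol_list:
--         value = value * x + c
--     parts = []
--     n = len(pol_list)
--     for i, c in enumerate(pol_list):
--         if c == 0:
--             continue
--         deg = n - 1 - i
--         m = -c if c < 0 else c
--         if deg > 1:
--             body = "x^{0}".format(deg) if m == 1 else "{0}*x^{1}".format(m, deg)
--         elif deg == 1:
--             body = "x" if m == 1 else "{0}*x".format(m)
--         else:
--             body = "{0}".format(m)
--         if parts:
--             parts.append((" + " if c > 0 else " - ") + body)
--         else:
--             parts.append(body if c > 0 else "-" + body)
--     return "For {0} with x = {1} the value is {2}".format("".join(parts), x, value)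
-- ===== Notes on version B (the rewrite author's own statement) =====
-- stated objective: faster
-- what changed: B evaluates the polynomial with a single Horner pass (one multiply-add per coefficient) instead of recomputing x**idx for every term, and formats the terms in one forward enumerate pass keyed on whether any part was emitted yet instead of A's countdown index and idx2 counter.
import Mathlib
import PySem

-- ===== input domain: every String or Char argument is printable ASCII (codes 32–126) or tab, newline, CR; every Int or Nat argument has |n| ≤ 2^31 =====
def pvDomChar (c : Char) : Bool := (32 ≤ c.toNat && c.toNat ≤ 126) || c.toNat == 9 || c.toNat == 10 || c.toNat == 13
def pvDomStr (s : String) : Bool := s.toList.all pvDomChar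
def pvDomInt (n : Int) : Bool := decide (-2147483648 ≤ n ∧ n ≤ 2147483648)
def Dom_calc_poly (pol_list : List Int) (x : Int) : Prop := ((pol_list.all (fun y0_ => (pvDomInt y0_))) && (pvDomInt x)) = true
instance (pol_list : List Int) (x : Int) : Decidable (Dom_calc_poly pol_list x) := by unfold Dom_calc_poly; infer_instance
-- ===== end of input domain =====

-- B replaces A's per-term x**idx exponentiation by a single Horner pass for the value
-- and a forward enumerate pass for the formatted terms (objective: faster, asymptotic).

-- ===== PORT A =====
-- literal transliteration of A; `coef is not 0` is `coef != 0` on ints (0 is interned),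
-- `x ** idx` has idx ≥ 0 throughout the loop, ported as x ^ idx.toNat.
def calc_poly (pol_list : List Int) (x : Int) : String :=
  let q : Int := (pol_list.length : Int) - 1
  let st :=
    (PySem.List.pyRange q (-1) (-1)).foldl
      (fun (st : List String × Int × Int) (idx : Int) =>
        let cpol := st.1
        let acc := st.2.1
        let idx2 := st.2.2
        let coef := PySem.List.pyGetD pol_list (q - idx) 0
        if coef ≠ 0 then
          let acc := acc + coef * x ^ idx.toNat
          let copy_coef := if coef > 0 then coef else -coef
          let pol :=
            if idx > 1 then
              if copy_coef > 1 ∨ copy_coef < 0 then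
                PySem.Int.toStr copy_coef ++ "*x^" ++ PySem.Int.toStr idx
              else "x^" ++ PySem.Int.toStr idx
            else if idx = 1 then
              if copy_coef > 1 ∨ copy_coef < 0 then PySem.Int.toStr copy_coef ++ "*x"
              else "x"
            else PySem.Int.toStr copy_coef
          let pol :=
            if idx2 < q then
              if coef > 0 then " + " ++ pol else " - " ++ pol
            else if coef < 0 then "-" ++ pol
            else pol
          (cpol ++ [pol], acc, idx2 - 1)
        else st)
      ([], 0, q)
  "For " ++ PySem.Str.join "" st.1 ++ " with x = " ++ PySem.Int.toStr x
    ++ " the value is " ++ PySem.Int.toStr st.2.1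

-- ===== PORT B =====
def calc_poly_alt (pol_list : List Int) (x : Int) : String :=
  let value := pol_list.foldl (fun a c => a * x + c) 0
  let n : Int := pol_list.length
  let parts :=
    (PySem.List.enumerate pol_list).foldl
      (fun (parts : List String) (p : Int × Int) =>
        let i := p.1
        let c := p.2
        if c = 0 then parts
        else
          let deg := n - 1 - i
          let m := if c < 0 then -c else c
          let body :=
            if deg > 1 then
              if m = 1 then "x^" ++ PySem.Int.toStr deg
              else PySem.Int.toStr m ++ "*x^" ++ PySem.Int.toStr deg
            else if deg = 1 then
              if m = 1 then "x" else PySem.Int.toStr m ++ "*x"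
            else PySem.Int.toStr m
          if parts.isEmpty then
            parts ++ [if c > 0 then body else "-" ++ body]
          else
            parts ++ [(if c > 0 then " + " else " - ") ++ body])
      []
  "For " ++ PySem.Str.join "" parts ++ " with x = " ++ PySem.Int.toStr x
    ++ " the value is " ++ PySem.Int.toStr value

-- ===== PRECONDITION & SPEC =====
def Spec_calc_poly (pol_list : List Int) (x : Int) (out : String) : Prop := out = calc_poly_alt pol_list x
instance (pol_list : List Int) (x : Int) (out : String) : Decidable (Spec_calc_poly pol_list x out) := by unfold Spec_calc_poly; infer_instance

-- ===== CLAIM (what is proved, stated in full; the proofs are below) =====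
def Claim_equal_calc_poly : Prop := ∀ (pol_list : List Int) (x : Int), Dom_calc_poly pol_list x → Spec_calc_poly pol_list x (calc_poly pol_list x)

-- ===== LEMMAS AND PROOFS =====

-- each coefficient paired with its exponent (= length of the tail after it)
def pvZipExp : List Int → List (Int × Int)
  | [] => []
  | c :: t => (c, (t.length : Int)) :: pvZipExp t

-- A's loop step, with the (coefficient, exponent) pair taken directly
def pvStepA (x q : Int) (st : List String × Int × Int) (p : Int × Int) : List String × Int × Int :=
  let cpol := st.1
  let acc := st.2.1
  let idx2 := st.2.2
  let coef := p.1
  let idx := p.2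
  if coef ≠ 0 then
    let acc := acc + coef * x ^ idx.toNat
    let copy_coef := if coef > 0 then coef else -coef
    let pol :=
      if idx > 1 then
        if copy_coef > 1 ∨ copy_coef < 0 then
          PySem.Int.toStr copy_coef ++ "*x^" ++ PySem.Int.toStr idx
        else "x^" ++ PySem.Int.toStr idx
      else if idx = 1 then
        if copy_coef > 1 ∨ copy_coef < 0 then PySem.Int.toStr copy_coef ++ "*x"
        else "x"
      else PySem.Int.toStr copy_coef
    let pol :=
      if idx2 < q then
        if coef > 0 then " + " ++ pol else " - " ++ pol
      else if coef < 0 then "-" ++ pol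
      else pol
    (cpol ++ [pol], acc, idx2 - 1)
  else st

-- B's loop step, with the (coefficient, exponent) pair taken directly
def pvStepB (_x : Int) (parts : List String) (p : Int × Int) : List String :=
  let c := p.1
  let deg := p.2
  if c = 0 then parts
  else
    let m := if c < 0 then -c else c
    let body :=
      if deg > 1 then
        if m = 1 then "x^" ++ PySem.Int.toStr deg
        else PySem.Int.toStr m ++ "*x^" ++ PySem.Int.toStr deg
      else if deg = 1 then
        if m = 1 then "x" else PySem.Int.toStr m ++ "*x"
      else PySem.Int.toStr m
    if parts.isEmpty then
      parts ++ [if c > 0 then body else "-" ++ body]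
    else
      parts ++ [(if c > 0 then " + " else " - ") ++ body]

def pvSum (x : Int) (zl : List (Int × Int)) : Int :=
  (zl.map (fun p => p.1 * x ^ p.2.toNat)).sum

-- A's countdown range, read through pol_list, is exactly pvZipExp
lemma pvRangeMapA : ∀ (l : List Int),
    ((PySem.List.pyRange ((l.length : Int) - 1) (-1) (-1)).map
      (fun idx => (PySem.List.pyGetD l (((l.length : Int) - 1) - idx) 0, idx))) = pvZipExp l := by
  intro l
  induction l with
  | nil => simp [PySem.List.pyRange_neg_one_eq_nil, pvZipExp]
  | cons c t ih =>
    have hq : (-1 : Int) < ((c :: t).length : Int) - 1 := by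
      simp; omega
    rw [PySem.List.pyRange_neg_one_cons hq]
    simp only [List.map_cons, pvZipExp, List.cons.injEq]
    rw [← ih]
    have hlen : ((c :: t).length : Int) - 1 - 1 = (t.length : Int) - 1 := by
      simp
    rw [hlen]
    refine ⟨?_, List.map_congr_left ?_⟩
    · have h0 : ((c :: t).length : Int) - 1 - (((c :: t).length : Int) - 1) = ((0 : Nat) : Int) := by
        push_cast; ring
      rw [h0, PySem.List.pyGetD_natCast]
      simp
    intro idx hidx
    rw [PySem.List.mem_pyRange_neg_one] at hidx
    have h2 : (0 : Int) ≤ (t.length : Int) - 1 - idx := by omega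
    obtain ⟨k, hk⟩ := Int.eq_ofNat_of_zero_le h2
    have h1 : ((c :: t).length : Int) - 1 - idx = ((k + 1 : Nat) : Int) := by
      simp; omega
    simp only [h1, hk, Prod.mk.injEq]
    refine ⟨?_, trivial⟩
    simp only [PySem.List.pyGetD_natCast, List.getD]
    simp

-- B's enumerate, mapped to (coefficient, exponent) pairs, is exactly pvZipExp
lemma pvEnumMapB : ∀ (l : List Int) (s n : Int), n - s = (l.length : Int) →
    (PySem.List.enumerate l s).map (fun p => (p.2, n - 1 - p.1)) = pvZipExp l := by
  intro l
  induction l with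
  | nil => intro s n _; simp [PySem.List.enumerate_nil, pvZipExp]
  | cons c t ih =>
    intro s n h
    rw [PySem.List.enumerate_cons]
    simp only [List.map_cons, pvZipExp, List.cons.injEq]
    refine ⟨?_, ih (s + 1) n (by simp at h ⊢; omega)⟩
    have : n - 1 - s = (t.length : Int) := by simp at h; omega
    rw [this]

-- Horner's rule against the exponent-paired sum
lemma pvHorner (x : Int) : ∀ (l : List Int) (a : Int),
    l.foldl (fun a c => a * x + c) a = a * x ^ l.length + pvSum x (pvZipExp l) := by
  intro l
  induction l with
  | nil => intro a; simp [pvZipExp, pvSum]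
  | cons c t ih =>
    intro a
    simp only [List.foldl_cons, pvZipExp, pvSum, List.map_cons, List.sum_cons]
    rw [ih]
    simp only [pvSum, List.length_cons, Int.toNat_natCast]
    rw [pow_succ]
    ring

-- the term string A builds equals the term string B builds (c ≠ 0)
lemma pvBodyEq (c e : Int) (hc : c ≠ 0) :
    (if e > 1 then
        if (if c > 0 then c else -c) > 1 ∨ (if c > 0 then c else -c) < 0 then
          PySem.Int.toStr (if c > 0 then c else -c) ++ "*x^" ++ PySem.Int.toStr e
        else "x^" ++ PySem.Int.toStr e
      else if e = 1 then
        if (if c > 0 then c else -c) > 1 ∨ (if c > 0 then c else -c) < 0 then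
          PySem.Int.toStr (if c > 0 then c else -c) ++ "*x"
        else "x"
      else PySem.Int.toStr (if c > 0 then c else -c)) =
    (if e > 1 then
        if (if c < 0 then -c else c) = 1 then "x^" ++ PySem.Int.toStr e
        else PySem.Int.toStr (if c < 0 then -c else c) ++ "*x^" ++ PySem.Int.toStr e
      else if e = 1 then
        if (if c < 0 then -c else c) = 1 then "x"
        else PySem.Int.toStr (if c < 0 then -c else c) ++ "*x"
      else PySem.Int.toStr (if c < 0 then -c else c)) := by
  have hmeq : (if c > 0 then c else -c) = (if c < 0 then -c else c) := by
    split_ifs <;> omega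
  have hcond : ((if c < 0 then -c else c) > 1 ∨ (if c < 0 then -c else c) < 0) ↔
      ¬ ((if c < 0 then -c else c) = 1) := by
    split_ifs <;> omega
  rw [hmeq]
  simp only [hcond, ite_not]

-- one step of A's loop does what one step of B's loop does (plus value/counter bookkeeping)
lemma pvStepEq (x q : Int) (cpol : List String) (acc : Int) (c e : Int) :
    pvStepA x q (cpol, acc, q - (cpol.length : Int)) (c, e) =
      (pvStepB x cpol (c, e), acc + c * x ^ e.toNat,
       q - ((pvStepB x cpol (c, e)).length : Int)) := by
  by_cases hc : c = 0
  · subst hc; simp [pvStepA, pvStepB]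
  · simp only [pvStepA, pvStepB]
    rw [if_pos hc, if_neg hc, pvBodyEq c e hc]
    have hsign : (q - (cpol.length : Int) < q) ↔ ¬ cpol.isEmpty = true := by
      cases cpol <;> simp
    refine Prod.ext ?_ (Prod.ext rfl ?_)
    · by_cases hb : cpol.isEmpty = true
      · rw [if_neg (by rw [hsign]; exact not_not_intro hb), if_pos hb]
        by_cases hpos : c > 0
        · rw [if_neg (show ¬ c < 0 by omega), if_pos hpos]
        · rw [if_pos (show c < 0 by omega), if_neg hpos]
      · rw [if_pos (hsign.mpr hb), if_neg hb]
        by_cases hpos : c > 0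
        · rw [if_pos hpos, if_pos hpos]
        · rw [if_neg hpos, if_neg hpos]
    · by_cases hb : cpol.isEmpty = true <;>
        [rw [if_pos hb]; rw [if_neg hb]] <;>
      · simp only [List.length_append, List.length_cons, List.length_nil]
        push_cast
        ring

-- the two loops agree over any pvZipExp-shaped term list
lemma pvMain (x q : Int) : ∀ (zl : List (Int × Int)) (cpol : List String) (acc : Int),
    zl.foldl (pvStepA x q) (cpol, acc, q - (cpol.length : Int)) =
      (zl.foldl (pvStepB x) cpol,
       acc + pvSum x zl,
       q - ((zl.foldl (pvStepB x) cpol).length : Int)) := by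
  intro zl
  induction zl with
  | nil => intro cpol acc; simp [pvSum]
  | cons p rest ih =>
    intro cpol acc
    obtain ⟨c, e⟩ := p
    rw [List.foldl_cons, List.foldl_cons, pvStepEq, ih]
    simp only [pvSum, List.map_cons, List.sum_cons]
    refine Prod.ext rfl (Prod.ext ?_ rfl)
    ring

-- ===== VERDICT (by name: the statement is the Claim_ definition above) =====
theorem calc_poly_spec : Claim_equal_calc_poly := by
  intro l x _
  unfold Spec_calc_poly calc_poly calc_poly_alt
  show "For " ++ PySem.Str.join ""
        ((PySem.List.pyRange ((l.length : Int) - 1) (-1) (-1)).foldl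
          (fun st idx => pvStepA x ((l.length : Int) - 1) st
            (PySem.List.pyGetD l (((l.length : Int) - 1) - idx) 0, idx))
          ([], 0, (l.length : Int) - 1)).1 ++ " with x = " ++ PySem.Int.toStr x
      ++ " the value is " ++ PySem.Int.toStr
        ((PySem.List.pyRange ((l.length : Int) - 1) (-1) (-1)).foldl
          (fun st idx => pvStepA x ((l.length : Int) - 1) st
            (PySem.List.pyGetD l (((l.length : Int) - 1) - idx) 0, idx))
          ([], 0, (l.length : Int) - 1)).2.1
    = "For " ++ PySem.Str.join ""
        ((PySem.List.enumerate l).foldl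
          (fun parts p => pvStepB x parts (p.2, (l.length : Int) - 1 - p.1)) [])
      ++ " with x = " ++ PySem.Int.toStr x ++ " the value is "
      ++ PySem.Int.toStr (l.foldl (fun a c => a * x + c) 0)
  have hA : (PySem.List.pyRange ((l.length : Int) - 1) (-1) (-1)).foldl
      (fun st idx => pvStepA x ((l.length : Int) - 1) st
        (PySem.List.pyGetD l (((l.length : Int) - 1) - idx) 0, idx))
      ([], 0, (l.length : Int) - 1) =
      (pvZipExp l).foldl (pvStepA x ((l.length : Int) - 1)) ([], 0, (l.length : Int) - 1) := by
    rw [← pvRangeMapA l, List.foldl_map]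
  have hB : (PySem.List.enumerate l).foldl
      (fun parts p => pvStepB x parts (p.2, (l.length : Int) - 1 - p.1)) [] =
      (pvZipExp l).foldl (pvStepB x) [] := by
    rw [← pvEnumMapB l 0 (l.length : Int) (by simp), List.foldl_map]
  have hmain := pvMain x ((l.length : Int) - 1) (pvZipExp l) [] 0
  simp only [List.length_nil, Nat.cast_zero, sub_zero] at hmain
  rw [hA, hmain, hB, pvHorner x l 0]
  simp
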